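-- pv_equiv track=rewrite | github.com/vinodkc/Python_projects | 23-fizzbuzz-challenge/main.py | count_fizzbuzz
-- ===== SOURCE A (Python) =====
-- def fizzbuzz(n):
--     """Return FizzBuzz value for number n."""
--     if n % 15 == 0:
--         return "FizzBuzz"
--     elif n % 3 == 0:
--         return "Fizz"
--     elif n % 5 == 0:
--         return "Buzz"
--     else:
--         return str(n)
--
-- def count_fizzbuzz(start, end):
--     """Count Fizz, Buzz, and FizzBuzz occurrences."""
--     fizz_count = 0
--     buzz_count = 0
--     fizzbuzz_count = 0
--
--     for i in range(start, end + 1):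
--         result = fizzbuzz(i)
--         if result == "Fizz":
--             fizz_count += 1
--         elif result == "Buzz":
--             buzz_count += 1
--         elif result == "FizzBuzz":
--             fizzbuzz_count += 1
--
--     return fizz_count, buzz_count, fizzbuzz_count
-- ===== SOURCE B (Python) =====
-- def count_fizzbuzz(start, end):
--     """Count Fizz, Buzz, and FizzBuzz occurrences."""
--     if start > end:
--         return 0, 0, 0
--     def multiples(k):
--         return end // k - (start - 1) // k
--     both = multiples(15)
--     return multiples(3) - both, multiples(5) - both, both
-- ===== Notes on version B (the rewrite author's own statement) =====
-- stated objective: faster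
-- what changed: Replaces the per-element loop with closed-form multiple counting floor(end/k)-floor((start-1)/k) for k=3,5,15; intended as faster (O(1) vs O(n)), measured 116x median at the largest size though empty-range inputs tie.
import Mathlib
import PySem

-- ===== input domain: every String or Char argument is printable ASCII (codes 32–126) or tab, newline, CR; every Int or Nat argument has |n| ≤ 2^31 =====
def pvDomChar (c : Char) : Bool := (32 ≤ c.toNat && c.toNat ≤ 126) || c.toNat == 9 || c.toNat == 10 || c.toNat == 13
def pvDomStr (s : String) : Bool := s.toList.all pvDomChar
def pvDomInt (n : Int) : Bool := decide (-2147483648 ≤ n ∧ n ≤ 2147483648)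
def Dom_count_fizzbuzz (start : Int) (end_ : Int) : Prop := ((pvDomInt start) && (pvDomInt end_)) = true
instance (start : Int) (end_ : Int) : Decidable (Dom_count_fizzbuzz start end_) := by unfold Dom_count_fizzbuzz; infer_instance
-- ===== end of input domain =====

-- B counts multiples in closed form (floor(end/k)-floor((start-1)/k), k=3,5,15) instead of A's per-element loop; proven equal on all inputs.

-- ===== PORT A =====
-- helper fizzbuzz(n), as in the Python
def fizzbuzz (n : Int) : String :=
  if PySem.Int.mod n 15 == 0 then "FizzBuzz"
  else if PySem.Int.mod n 3 == 0 then "Fizz"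
  else if PySem.Int.mod n 5 == 0 then "Buzz"
  else PySem.Int.toStr n

-- body of A's for-loop, as a fold step over (fizz_count, buzz_count, fizzbuzz_count)
def fbStep (acc : Int × Int × Int) (i : Int) : Int × Int × Int :=
  let result := fizzbuzz i
  if result == "Fizz" then (acc.1 + 1, acc.2.1, acc.2.2)
  else if result == "Buzz" then (acc.1, acc.2.1 + 1, acc.2.2)
  else if result == "FizzBuzz" then (acc.1, acc.2.1, acc.2.2 + 1)
  else acc

def count_fizzbuzz (start : Int) (end_ : Int) : List Int :=
  let r := (PySem.List.pyRange start (end_ + 1) 1).foldl fbStep (0, 0, 0)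
  [r.1, r.2.1, r.2.2]

-- ===== PORT B =====
def count_fizzbuzz_alt (start : Int) (end_ : Int) : List Int :=
  if start > end_ then [0, 0, 0]
  else
    let multiples := fun (k : Int) =>
      PySem.Int.floordiv end_ k - PySem.Int.floordiv (start - 1) k
    let both := multiples 15
    [multiples 3 - both, multiples 5 - both, both]

-- ===== PRECONDITION & SPEC =====
def Spec_count_fizzbuzz (start : Int) (end_ : Int) (out : List Int) : Prop := out = count_fizzbuzz_alt start end_
instance (start : Int) (end_ : Int) (out : List Int) : Decidable (Spec_count_fizzbuzz start end_ out) := by unfold Spec_count_fizzbuzz; infer_instance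

-- ===== CLAIM (what is proved, stated in full; the proofs are below) =====
def Claim_equal_count_fizzbuzz : Prop := ∀ (start : Int) (end_ : Int), Dom_count_fizzbuzz start end_ → Spec_count_fizzbuzz start end_ (count_fizzbuzz start end_)

-- ===== LEMMAS AND PROOFS =====

-- every character str(n) produces is '-' or a decimal digit
lemma mem_toDigitsCore_digit (fuel n : Nat) (acc : List Char)
    (hacc : ∀ c ∈ acc, c.isDigit = true) :
    ∀ c ∈ Nat.toDigitsCore 10 fuel n acc, c.isDigit = true := by
  induction fuel generalizing n acc with
  | zero => simpa [Nat.toDigitsCore] using hacc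
  | succ f ih =>
    intro c hc
    have hd : (n % 10).digitChar.isDigit = true := by
      have : n % 10 < 10 := Nat.mod_lt _ (by norm_num)
      interval_cases (n % 10) <;> decide
    simp only [Nat.toDigitsCore] at hc
    split at hc
    · rw [List.mem_cons] at hc
      rcases hc with h | h
      · simpa [h] using hd
      · exact hacc c h
    · exact ih (n / 10) _ (by
        intro c hc
        rw [List.mem_cons] at hc
        rcases hc with h | h
        · simpa [h] using hd
        · exact hacc c h) c hc

lemma mem_toChars (i : Int) (c : Char) (hc : c ∈ PySem.Int.toChars i) :
    c = '-' ∨ c.isDigit = true := by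
  unfold PySem.Int.toChars at hc
  split at hc
  · rw [List.mem_cons] at hc
    rcases hc with h | h
    · exact Or.inl h
    · exact Or.inr (mem_toDigitsCore_digit _ _ [] (by simp) c h)
  · exact Or.inr (mem_toDigitsCore_digit _ _ [] (by simp) c hc)

lemma toStr_ne (i : Int) (s : String) (hs : s.toList ≠ [])
    (hhead : s.toList.head hs ≠ '-' ∧ (s.toList.head hs).isDigit = false) :
    PySem.Int.toStr i ≠ s := by
  intro h
  have h2 : PySem.Int.toChars i = s.toList := by
    rw [← PySem.Int.toList_toStr, h]
  have hmem : s.toList.head hs ∈ PySem.Int.toChars i := by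
    rw [h2]; exact List.head_mem hs
  rcases mem_toChars i _ hmem with h3 | h3
  · exact hhead.1 h3
  · rw [hhead.2] at h3; exact Bool.false_ne_true h3

-- A's loop step, expressed by the mod conditions
lemma fbStep_eq (acc : Int × Int × Int) (i : Int) :
    fbStep acc i =
      if i % 15 = 0 then (acc.1, acc.2.1, acc.2.2 + 1)
      else if i % 3 = 0 then (acc.1 + 1, acc.2.1, acc.2.2)
      else if i % 5 = 0 then (acc.1, acc.2.1 + 1, acc.2.2)
      else acc := by
  have e15 : PySem.Int.mod i 15 = i % 15 := PySem.Int.mod_eq_emod_of_pos (by norm_num)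
  have e3 : PySem.Int.mod i 3 = i % 3 := PySem.Int.mod_eq_emod_of_pos (by norm_num)
  have e5 : PySem.Int.mod i 5 = i % 5 := PySem.Int.mod_eq_emod_of_pos (by norm_num)
  have hF : PySem.Int.toStr i ≠ "Fizz" := toStr_ne i _ (by decide) (by decide)
  have hB : PySem.Int.toStr i ≠ "Buzz" := toStr_ne i _ (by decide) (by decide)
  have hFB : PySem.Int.toStr i ≠ "FizzBuzz" := toStr_ne i _ (by decide) (by decide)
  unfold fbStep fizzbuzz
  rw [e15, e3, e5]
  split_ifs with h15 h3 h5 <;>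
    simp_all [beq_iff_eq]

-- closed-form loop characterisation, peeling the last element
lemma loop_closed (n : Nat) : ∀ (start e : Int), start ≤ e + 1 → (e + 1 - start).toNat = n →
    (PySem.List.pyRange start (e + 1) 1).foldl fbStep (0, 0, 0) =
      ((e / 3 - (start - 1) / 3) - (e / 15 - (start - 1) / 15),
       (e / 5 - (start - 1) / 5) - (e / 15 - (start - 1) / 15),
       (e / 15 - (start - 1) / 15)) := by
  induction n with
  | zero =>
    intro start e hle h0
    have : start = e + 1 := by omega
    subst this
    rw [PySem.List.pyRange_one_eq_nil (by omega)]
    simp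
  | succ m ih =>
    intro start e hle hn
    have hse : start ≤ e := by omega
    rw [PySem.List.pyRange_one_succ_right hse, List.foldl_append]
    have ihe := ih start (e - 1) (by omega) (by omega)
    rw [show e - 1 + 1 = e by ring] at ihe
    rw [ihe, List.foldl_cons, List.foldl_nil, fbStep_eq]
    have h35 : e % 15 % 3 = e % 3 := Int.emod_emod_of_dvd e (by norm_num)
    have h55 : e % 15 % 5 = e % 5 := Int.emod_emod_of_dvd e (by norm_num)
    have k3 : e % 3 = 0 → (e - 1) / 3 = e / 3 - 1 := by omega
    have k3' : e % 3 ≠ 0 → (e - 1) / 3 = e / 3 := by omega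
    have k5 : e % 5 = 0 → (e - 1) / 5 = e / 5 - 1 := by omega
    have k5' : e % 5 ≠ 0 → (e - 1) / 5 = e / 5 := by omega
    have k15 : e % 15 = 0 → (e - 1) / 15 = e / 15 - 1 := by omega
    have k15' : e % 15 ≠ 0 → (e - 1) / 15 = e / 15 := by omega
    split_ifs with h15 hh3 h5
    · have d3 := k3 (by omega)
      have d5 := k5 (by omega)
      have d15 := k15 h15
      refine Prod.ext ?_ (Prod.ext ?_ ?_) <;> simp only <;> omega
    · have d3 := k3 hh3
      have d5 := k5' (by omega)
      have d15 := k15' h15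
      refine Prod.ext ?_ (Prod.ext ?_ ?_) <;> simp only <;> omega
    · have d3 := k3' hh3
      have d5 := k5 h5
      have d15 := k15' h15
      refine Prod.ext ?_ (Prod.ext ?_ ?_) <;> simp only <;> omega
    · have d3 := k3' hh3
      have d5 := k5' h5
      have d15 := k15' h15
      refine Prod.ext ?_ (Prod.ext ?_ ?_) <;> simp only <;> omega

-- ===== VERDICT (by name: the statement is the Claim_ definition above) =====
theorem count_fizzbuzz_spec : Claim_equal_count_fizzbuzz := by
  intro start end_ _
  unfold Spec_count_fizzbuzz count_fizzbuzz count_fizzbuzz_alt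
  split_ifs with h
  · rw [PySem.List.pyRange_one_eq_nil (by omega)]
    simp
  · rw [loop_closed (end_ + 1 - start).toNat start end_ (by omega) rfl]
    have f3a : PySem.Int.floordiv end_ 3 = end_ / 3 := PySem.Int.floordiv_eq_ediv_of_pos (by norm_num)
    have f5a : PySem.Int.floordiv end_ 5 = end_ / 5 := PySem.Int.floordiv_eq_ediv_of_pos (by norm_num)
    have f15a : PySem.Int.floordiv end_ 15 = end_ / 15 := PySem.Int.floordiv_eq_ediv_of_pos (by norm_num)
    have f3b : PySem.Int.floordiv (start - 1) 3 = (start - 1) / 3 := PySem.Int.floordiv_eq_ediv_of_pos (by norm_num)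
    have f5b : PySem.Int.floordiv (start - 1) 5 = (start - 1) / 5 := PySem.Int.floordiv_eq_ediv_of_pos (by norm_num)
    have f15b : PySem.Int.floordiv (start - 1) 15 = (start - 1) / 15 := PySem.Int.floordiv_eq_ediv_of_pos (by norm_num)
    dsimp only
    rw [f3a, f5a, f15a, f3b, f5b, f15b]
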